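-- pv_equiv track=rewrite | github.com/michaeljoseph/advent_of_code | 2018/day02/__init__.py | any_repeats
-- ===== SOURCE A (Python) =====
-- from collections import Counter
--
-- def any_repeats(box_id: str, how_many: int):
--     counter = Counter(box_id)
--
--     repeats = [
--         state
--         for state, frequency in counter.most_common()
--         if frequency == how_many
--     ]
--     return any(repeats)
-- ===== SOURCE B (Python) =====
-- def any_repeats(box_id: str, how_many: int):
--     # Sort the characters and scan consecutive runs of equal characters,
--     # returning True as soon as a run has exactly how_many characters.
--     s = sorted(box_id)
--     i, n = 0, len(s)
--     while i < n:
--         j = i + 1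
--         while j < n and s[j] == s[i]:
--             j += 1
--         if j - i == how_many:
--             return True
--         i = j
--     return False
-- ===== Notes on version B (the rewrite author's own statement) =====
-- stated objective: alternative
-- what changed: Replaces the Counter frequency table plus most_common() filter with a sort-then-scan over consecutive runs of equal characters, returning True on the first run whose length equals how_many.
import Mathlib
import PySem

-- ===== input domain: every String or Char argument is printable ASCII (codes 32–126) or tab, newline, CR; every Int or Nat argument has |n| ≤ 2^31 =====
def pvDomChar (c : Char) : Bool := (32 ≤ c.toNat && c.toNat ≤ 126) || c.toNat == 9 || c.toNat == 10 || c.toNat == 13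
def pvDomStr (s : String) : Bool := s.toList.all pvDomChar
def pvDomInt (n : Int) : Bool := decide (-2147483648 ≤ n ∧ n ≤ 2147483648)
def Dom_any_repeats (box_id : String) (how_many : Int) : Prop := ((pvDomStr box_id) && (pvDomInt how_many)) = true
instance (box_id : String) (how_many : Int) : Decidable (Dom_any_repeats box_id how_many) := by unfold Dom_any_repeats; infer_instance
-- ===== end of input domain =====

-- B replaces A's Counter frequency table + most_common() filter with a
-- sort-then-scan over consecutive runs of equal characters (alternative algorithm).

-- ===== PORT A =====
def any_repeats (box_id : String) (how_many : Int) : Bool :=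
  let counter := PySem.Dict.counter box_id.toList
  -- counter.most_common() = sorted(items, key=frequency, reverse=True) (stable)
  let repeats := ((PySem.List.sorted counter.items (fun kv => kv.2) true).filter
      (fun kv => kv.2 == how_many)).map (fun kv => kv.1)
  -- any(repeats): every element is a one-char string, hence truthy
  !repeats.isEmpty

-- ===== PORT B =====
-- the outer while loop over index pairs (i, j): j - i is the length of the run
-- of characters equal to s[i] (the inner while loop = takeWhile on the tail)
def pvRunScan (k : Int) : List Char → Bool
  | [] => false
  | c :: rest =>
    if ((1 + (rest.takeWhile (fun x => x == c)).length : Int) == k) then true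
    else pvRunScan k (rest.dropWhile (fun x => x == c))
termination_by l => l.length
decreasing_by
  exact Nat.lt_succ_of_le (List.length_dropWhile_le _ _)

def any_repeats_alt (box_id : String) (how_many : Int) : Bool :=
  pvRunScan how_many (PySem.List.sorted box_id.toList (fun x => x) false)

-- ===== PRECONDITION & SPEC =====
def Spec_any_repeats (box_id : String) (how_many : Int) (out : Bool) : Prop := out = any_repeats_alt box_id how_many
instance (box_id : String) (how_many : Int) (out : Bool) : Decidable (Spec_any_repeats box_id how_many out) := by unfold Spec_any_repeats; infer_instance

-- ===== CLAIM (what is proved, stated in full; the proofs are below) =====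
def Claim_equal_any_repeats : Prop := ∀ (box_id : String) (how_many : Int), Dom_any_repeats box_id how_many → Spec_any_repeats box_id how_many (any_repeats box_id how_many)

-- ===== LEMMAS AND PROOFS =====

-- A returns true iff some character of the string occurs exactly how_many times
lemma any_repeats_true_iff (s : String) (k : Int) :
    any_repeats s k = true ↔ ∃ c ∈ s.toList, (s.toList.count c : Int) = k := by
  simp [any_repeats, List.filter_eq_nil_iff, PySem.List.mem_sorted,
        PySem.Dict.items_counter, PySem.Set.mem_ofList]

-- a sorted tail contains no further copies of c past its leading run of c's
lemma pv_drop_ne (c : Char) : ∀ (rest : List Char), (∀ x ∈ rest, c ≤ x) →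
    rest.Pairwise (· ≤ ·) → ∀ x ∈ rest.dropWhile (fun x => x == c), x ≠ c := by
  intro rest
  induction rest with
  | nil => simp
  | cons a rs ih =>
    intro hle hp
    by_cases hac : a = c
    · subst hac
      simp only [List.dropWhile_cons, BEq.rfl, if_pos]
      exact ih (fun x hx => hle x (List.mem_cons_of_mem _ hx)) hp.of_cons
    · rw [List.dropWhile_cons_of_neg (by simp [hac])]
      intro x hx
      rcases List.mem_cons.mp hx with h | h
      · simpa [h] using hac
      · have hca : c < a := lt_of_le_of_ne (hle a (List.mem_cons_self)) (fun e => hac e.symm)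
        have hax : a ≤ x := (List.pairwise_cons.mp hp).1 x h
        exact ne_of_gt (lt_of_lt_of_le hca hax)

lemma pv_take_eq (c : Char) (rest : List Char) :
    ∀ x ∈ rest.takeWhile (fun x => x == c), x = c := by
  intro x hx
  have := List.mem_takeWhile_imp hx
  simpa using this

-- on a sorted list c :: rest, the count of c is 1 + the leading run in rest
lemma pv_count_head (c : Char) (rest : List Char) (hle : ∀ x ∈ rest, c ≤ x)
    (hp : rest.Pairwise (· ≤ ·)) :
    (c :: rest).count c = 1 + (rest.takeWhile (fun x => x == c)).length := by
  have hsplit : rest.takeWhile (fun x => x == c) ++ rest.dropWhile (fun x => x == c) = rest :=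
    List.takeWhile_append_dropWhile
  have hct : (rest.takeWhile (fun x => x == c)).count c
      = (rest.takeWhile (fun x => x == c)).length :=
    List.count_eq_length.mpr (fun b hb => (pv_take_eq c rest b hb).symm)
  have hcd : (rest.dropWhile (fun x => x == c)).count c = 0 :=
    List.count_eq_zero.mpr (fun hmem => (pv_drop_ne c rest hle hp c hmem) rfl)
  have hr : rest.count c = (rest.takeWhile (fun x => x == c)).length := by
    conv_lhs => rw [← hsplit]
    rw [List.count_append, hct, hcd]; omega
  rw [List.count_cons_self, hr]; omega

-- characters other than the head keep their count in the dropped tail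
lemma pv_count_other (c x : Char) (rest : List Char) (hx : x ≠ c) :
    (c :: rest).count x = ((rest.dropWhile (fun x => x == c)).count x) := by
  have hsplit : rest.takeWhile (fun x => x == c) ++ rest.dropWhile (fun x => x == c) = rest :=
    List.takeWhile_append_dropWhile
  have hxt : (rest.takeWhile (fun x => x == c)).count x = 0 :=
    List.count_eq_zero.mpr (fun hmem => hx (pv_take_eq c rest x hmem))
  have h1 : (c :: rest).count x = rest.count x := by
    simp [Ne.symm hx]
  have h2 : rest.count x = (rest.dropWhile (fun x => x == c)).count x := by
    conv_lhs => rw [← hsplit]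
    rw [List.count_append, hxt]; omega
  rw [h1, h2]

-- B's run scan on a sorted list finds exactly a character of count k
lemma pvRunScan_true_iff (k : Int) : ∀ (l : List Char), l.Pairwise (· ≤ ·) →
    (pvRunScan k l = true ↔ ∃ c ∈ l, (l.count c : Int) = k) := by
  intro l
  induction l using pvRunScan.induct k with
  | case1 => simp [pvRunScan]
  | case2 c rest htrue =>
    intro hp
    obtain ⟨hle, hprest⟩ := List.pairwise_cons.mp hp
    rw [pvRunScan]
    simp only [htrue, if_pos, true_iff]
    refine ⟨c, List.mem_cons_self, ?_⟩
    rw [pv_count_head c rest hle hprest]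
    have := of_decide_eq_true htrue
    push_cast
    omega
  | case3 c rest hfalse ih =>
    intro hp
    obtain ⟨hle, hprest⟩ := List.pairwise_cons.mp hp
    have hpd : (rest.dropWhile (fun x => x == c)).Pairwise (· ≤ ·) :=
      hprest.sublist (List.dropWhile_sublist _)
    have hdsub : (rest.dropWhile (fun x => x == c)).Sublist rest := List.dropWhile_sublist _
    have hne : ∀ x ∈ rest.dropWhile (fun x => x == c), x ≠ c := pv_drop_ne c rest hle hprest
    have hkne : (1 + ((rest.takeWhile (fun x => x == c)).length : Int)) ≠ k := by
      intro e; simp [e] at hfalse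
    rw [pvRunScan, if_neg hfalse]
    rw [ih hpd]
    constructor
    · rintro ⟨x, hxmem, hxc⟩
      refine ⟨x, List.mem_cons_of_mem _ (hdsub.mem hxmem), ?_⟩
      rw [pv_count_other c x rest (hne x hxmem)]
      exact hxc
    · rintro ⟨x, hxmem, hxc⟩
      by_cases hxeq : x = c
      · exfalso
        subst hxeq
        rw [pv_count_head x rest hle hprest] at hxc
        push_cast at hxc
        exact hkne (by omega)
      · rcases List.mem_cons.mp hxmem with h | h
        · exact absurd h hxeq
        · have hxd : x ∈ rest.dropWhile (fun y => y == c) := by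
            rw [← List.takeWhile_append_dropWhile (p := fun y => y == c) (l := rest)] at h
            rcases List.mem_append.mp h with h' | h'
            · exact absurd (pv_take_eq c rest x h') hxeq
            · exact h'
          refine ⟨x, hxd, ?_⟩
          rw [← pv_count_other c x rest hxeq]
          exact hxc

lemma any_repeats_alt_true_iff (s : String) (k : Int) :
    any_repeats_alt s k = true ↔ ∃ c ∈ s.toList, (s.toList.count c : Int) = k := by
  unfold any_repeats_alt
  have hperm : (PySem.List.sorted s.toList (fun x => x) false).Perm s.toList :=
    PySem.List.sorted_perm ..
  rw [pvRunScan_true_iff k _ (PySem.List.sorted_pairwise ..)]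
  constructor <;> rintro ⟨c, hc, hcount⟩ <;> refine ⟨c, ?_, ?_⟩
  · exact hperm.mem_iff.mp hc
  · rw [← hperm.count_eq]; exact hcount
  · exact hperm.mem_iff.mpr hc
  · rw [hperm.count_eq]; exact hcount

-- ===== VERDICT (by name: the statement is the Claim_ definition above) =====
theorem any_repeats_spec : Claim_equal_any_repeats := by
  intro s k _
  unfold Spec_any_repeats
  exact Bool.eq_iff_iff.mpr ((any_repeats_true_iff s k).trans (any_repeats_alt_true_iff s k).symm)
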